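-- pv_equiv track=rewrite | github.com/ClementB-01/Projects-A3S6-Datascience-IA | Association.py | Redundancy
-- ===== SOURCE A (Python) =====
-- def Redundancy(c,a): #Test de la redondance d'une liste avec une autre | FONCTIONNELLE EN TEST UNITAIRE
--     compteur = 0
--     for i in c: #
--         compte = 0
--         for j in a: # On parcourt le tuple à tester
--             if j in i: # Si un élement du tuple est dans le c[j] on ajoute 1 au compteur
--                 compte += 1
--         if compte == len(a):
--             compteur += 1
--     return compteur # On retourne le nombre de redondance
-- ===== SOURCE B (Python) =====
-- def Redundancy(c, a):
--     # Shrinking-candidate formulation: one filtering pass per element of a.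
--     candidates = list(c)
--     for j in a:
--         candidates = [i for i in candidates if j in i]
--     return len(candidates)
-- ===== Notes on version B (the rewrite author's own statement) =====
-- stated objective: faster
-- what changed: Inverts the loop nesting: instead of counting per-collection matches against a, B maintains a shrinking candidate list, filtering it once per element of a, and returns its final length; the candidate list shrinks after each pass so later passes scan fewer collections and non-matching collections are dropped at their first failing element.
import Mathlib
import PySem

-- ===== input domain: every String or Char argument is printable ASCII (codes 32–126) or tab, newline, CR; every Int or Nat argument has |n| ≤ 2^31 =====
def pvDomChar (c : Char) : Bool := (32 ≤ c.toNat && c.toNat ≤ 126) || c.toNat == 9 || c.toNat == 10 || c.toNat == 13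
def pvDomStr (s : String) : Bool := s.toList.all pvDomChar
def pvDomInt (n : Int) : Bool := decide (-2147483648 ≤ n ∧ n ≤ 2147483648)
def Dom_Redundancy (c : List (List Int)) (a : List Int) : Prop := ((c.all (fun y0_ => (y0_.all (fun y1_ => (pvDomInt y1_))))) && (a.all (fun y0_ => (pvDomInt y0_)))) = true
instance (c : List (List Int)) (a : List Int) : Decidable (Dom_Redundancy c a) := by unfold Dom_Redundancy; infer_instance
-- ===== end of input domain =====

-- B inverts the loop nesting: a shrinking candidate list filtered once per element of a; measurably faster since non-matching collections drop out at their first failing element.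
-- ===== PORT A =====
def Redundancy (c : List (List Int)) (a : List Int) : Int :=
  c.foldl (fun compteur i =>
    let compte : Int := a.foldl (fun compte j => if j ∈ i then compte + 1 else compte) 0
    if compte = (a.length : Int) then compteur + 1 else compteur) 0

-- ===== PORT B =====
def Redundancy_alt (c : List (List Int)) (a : List Int) : Int :=
  ((a.foldl (fun candidates j => candidates.filter (fun i => decide (j ∈ i))) c).length : Int)

-- ===== PRECONDITION & SPEC =====
def Spec_Redundancy (c : List (List Int)) (a : List Int) (out : Int) : Prop := out = Redundancy_alt c a
instance (c : List (List Int)) (a : List Int) (out : Int) : Decidable (Spec_Redundancy c a out) := by unfold Spec_Redundancy; infer_instance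

-- ===== CLAIM (what is proved, stated in full; the proofs are below) =====
def Claim_equal_Redundancy : Prop := ∀ (c : List (List Int)) (a : List Int), Dom_Redundancy c a → Spec_Redundancy c a (Redundancy c a)

-- ===== LEMMAS AND PROOFS =====

-- ===== VERDICT (by name: the statement is the Claim_ definition above) =====
-- inner count equals length of the filtered list, with accumulator k
lemma inner_count (i : List Int) (a : List Int) (k : Int) :
    a.foldl (fun compte j => if j ∈ i then compte + 1 else compte) k
      = k + ((a.filter (fun j => decide (j ∈ i))).length : Int) := by
  induction a generalizing k with
  | nil => simp
  | cons x xs ih =>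
    simp only [List.foldl_cons, List.filter_cons]
    by_cases h : x ∈ i
    · simp [h, ih, add_assoc]
      omega
    · simp [h, ih]

-- outer A-count equals length of filter-by-all, with accumulator k
lemma outer_count (c : List (List Int)) (a : List Int) (k : Int) :
    c.foldl (fun compteur i =>
      let compte : Int := a.foldl (fun compte j => if j ∈ i then compte + 1 else compte) 0
      if compte = (a.length : Int) then compteur + 1 else compteur) k
      = k + ((c.filter (fun i => a.all (fun j => decide (j ∈ i)))).length : Int) := by
  induction c generalizing k with
  | nil => simp
  | cons i cs ih =>
    simp only [List.foldl_cons, List.filter_cons]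
    have hc := inner_count i a 0
    by_cases h : a.all (fun j => decide (j ∈ i)) = true
    · have hlen : (a.filter (fun j => decide (j ∈ i))).length = a.length :=
        List.length_filter_eq_length_iff.mpr (by simpa [List.all_eq_true] using h)
      simp only [hc, zero_add, hlen, h, ih]
      simp
      omega
    · have hlt : (a.filter (fun j => decide (j ∈ i))).length < a.length := by
        rcases lt_or_eq_of_le (List.length_filter_le _ a) with hl | he
        · exact hl
        · exact absurd (List.length_filter_eq_length_iff.mp he)
            (by simpa [List.all_eq_true] using h)
      have hne : (((a.filter (fun j => decide (j ∈ i))).length : Int)) ≠ (a.length : Int) := by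
        exact_mod_cast Nat.ne_of_lt hlt
      simp only [hc, zero_add, if_neg hne, h, ih]
      simp

-- B's chained filters equal one filter by the conjunction of all memberships
lemma chain_filter (a : List Int) (c : List (List Int)) :
    a.foldl (fun candidates j => candidates.filter (fun i => decide (j ∈ i))) c
      = c.filter (fun i => a.all (fun j => decide (j ∈ i))) := by
  induction a generalizing c with
  | nil => simp
  | cons x xs ih =>
    simp only [List.foldl_cons, ih, List.filter_filter, List.all_cons]
    congr 1
    funext i
    by_cases h : x ∈ i <;> simp [h, Bool.and_comm]

theorem Redundancy_spec : Claim_equal_Redundancy := by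
  intro c a _
  unfold Spec_Redundancy Redundancy Redundancy_alt
  rw [outer_count, chain_filter]
  simp
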